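-- pv_equiv track=rewrite | github.com/land-boards/lb-boards | KiCAD/utilities/kiPL/src/kiPL.py | sortedRefDes
-- ===== SOURCE A (Python) =====
-- def sortedRefDes(refString):
-- 	""" Reference designators are pre-sorted but not in an ideal way
-- 	This function sorts reference designators like this one:
-- 	['C1', 'C10', 'C2', 'C3', 'C5', 'C6']
-- 	Into a list like this one:
-- 	['C1', 'C2', 'C3', 'C5', 'C6', 'C10']
-- 	"""
-- 	#print "sortedRefDes: stuff to sort",refString
-- 	refDesList = refString.split(',')
-- 	#print refDesList
-- 	shortestRefDes = 10
-- 	longestRefDes = 0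
-- 	newRefDesList = []
-- 	for refDes in refDesList:
-- 		if len(refDes) < shortestRefDes:
-- 			shortestRefDes = len(refDes)
-- 		if len(refDes) > longestRefDes:
-- 			longestRefDes = len(refDes)
-- 	if shortestRefDes == longestRefDes:
-- 		return refString
-- 	else:
-- 		#print "Some sorting to do"	# Example: ['C1', 'C10', 'C2', 'C3', 'C5', 'C6']
-- 		for leng in range(shortestRefDes,longestRefDes+1):
-- 			for refDes in refDesList:
-- 				if len(refDes) == leng:
-- 					newRefDesList.append(refDes)
-- 		#print "newRefDesList",newRefDesList
-- 	newRefDesString = ''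
-- 	for item in newRefDesList:
-- 		newRefDesString += item
-- 		newRefDesString += ','
-- 	return newRefDesString[:-1]
-- ===== SOURCE B (Python) =====
-- def sortedRefDes(refString):
-- 	""" Stable sort of comma-separated ref designators by length (idiomatic one-liner). """
-- 	return ','.join(sorted(refString.split(','), key=len))
-- ===== Notes on version B (the rewrite author's own statement) =====
-- stated objective: faster
-- what changed: Replaces the min/max length scan plus one full sweep of the list per length in the range (and character-by-character string rebuilding) with a single stable sort keyed by length and one join.
import Mathlib
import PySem

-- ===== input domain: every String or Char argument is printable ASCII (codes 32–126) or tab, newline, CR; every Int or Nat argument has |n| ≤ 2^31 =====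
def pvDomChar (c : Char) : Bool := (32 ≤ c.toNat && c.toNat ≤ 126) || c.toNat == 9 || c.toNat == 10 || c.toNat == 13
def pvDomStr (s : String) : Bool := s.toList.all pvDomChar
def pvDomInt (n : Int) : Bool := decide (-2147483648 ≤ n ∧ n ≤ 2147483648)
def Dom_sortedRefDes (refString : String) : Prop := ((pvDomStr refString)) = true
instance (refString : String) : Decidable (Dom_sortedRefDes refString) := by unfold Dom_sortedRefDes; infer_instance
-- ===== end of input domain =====

-- B replaces A's min/max length scan plus one full sweep per length in the range
-- with a single stable sort keyed by length and one join (measured faster in a timing run).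

-- ===== PORT A =====
-- A's first loop: the running (shortestRefDes, longestRefDes) pair, two ifs in sequence.
def pvLenScan (xs : List (List Char)) (p : Int × Int) : Int × Int :=
  List.foldl (fun (p : Int × Int) refDes =>
    let p1 := if ((refDes.length : Int)) < p.1 then ((refDes.length : Int), p.2) else p
    if ((refDes.length : Int)) > p1.2 then (p1.1, (refDes.length : Int)) else p1) p xs

-- string concatenation is ported as List Char append (exact); refString.split(',') is
-- PySem.Chars.splitOn on the character list (PySem.Str.split? with the literal "," is some of it).
def sortedRefDes (refString : String) : String :=
  let refDesList := PySem.Chars.splitOn refString.toList [',']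
  let mm := pvLenScan refDesList (10, 0)
  if mm.1 = mm.2 then refString
  else
    let newRefDesList :=
      List.foldl (fun acc leng =>
        List.foldl (fun acc refDes =>
          if ((refDes.length : Int) == leng) then acc ++ [refDes] else acc) acc refDesList)
        [] (PySem.List.pyRange mm.1 (mm.2 + 1))
    let chars := List.foldl (fun acc item => acc ++ item ++ [',']) ([] : List Char) newRefDesList
    String.ofList (PySem.List.slice chars none (some (-1)))

-- ===== PORT B =====
-- ','.join(sorted(refString.split(','), key=len))
def sortedRefDes_alt (refString : String) : String :=
  String.ofList (PySem.Chars.join [','] (PySem.List.sorted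
    (PySem.Chars.splitOn refString.toList [',']) (fun part => (part.length : Int))))

-- ===== PRECONDITION & SPEC =====
def Spec_sortedRefDes (refString : String) (out : String) : Prop := out = sortedRefDes_alt refString
instance (refString : String) (out : String) : Decidable (Spec_sortedRefDes refString out) := by unfold Spec_sortedRefDes; infer_instance

-- ===== CLAIM (what is proved, stated in full; the proofs are below) =====
def Claim_equal_sortedRefDes : Prop := ∀ (refString : String), Dom_sortedRefDes refString → Spec_sortedRefDes refString (sortedRefDes refString)

-- ===== LEMMAS AND PROOFS =====

-- PySem.Chars.splitOn with a one-character separator is Mathlib's List.splitOn.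
theorem splitOn_go_eq (c : Char) : ∀ (l : List Char) (fuel : Nat) (cur : List Char)
    (acc : List (List Char)), l.length ≤ fuel →
    PySem.Chars.splitOn.go [c] fuel l cur acc
      = acc.reverse ++ (List.splitOn c l).modifyHead (fun h => cur.reverse ++ h) := by
  intro l
  induction l with
  | nil =>
    intro fuel cur acc _
    cases fuel <;>
      simp [PySem.Chars.splitOn.go, List.splitOn, List.splitOnP_nil]
  | cons ch rest ih =>
    intro fuel cur acc hf
    cases fuel with
    | zero => simp at hf
    | succ fuel =>
      by_cases hc : ch = c
      · subst hc
        have hpre : List.isPrefixOf [ch] (ch :: rest) = true := by simp [List.isPrefixOf]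
        simp only [PySem.Chars.splitOn.go, hpre, if_true, List.length_cons, List.length_nil,
          List.drop_succ_cons, List.drop]
        rw [ih fuel [] (cur.reverse :: acc) (by simpa using hf)]
        simp [List.splitOn, List.splitOnP_cons]
        cases h : List.splitOnP (· == ch) rest <;> simp
      · have hpre : List.isPrefixOf [c] (ch :: rest) = false := by
          simp [List.isPrefixOf]
          exact fun h => absurd h.symm hc
        simp only [PySem.Chars.splitOn.go, hpre, Bool.false_eq_true, if_false]
        rw [ih fuel (ch :: cur) acc (by simpa using hf)]
        simp only [List.splitOn, List.splitOnP_cons]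
        have : (ch == c) = false := by simp [hc]
        rw [this]
        simp only [Bool.false_eq_true, if_false, List.modifyHead_modifyHead]
        have hfg : (fun h => (ch :: cur).reverse ++ h)
            = ((fun (h : List Char) => cur.reverse ++ h) ∘ List.cons ch) := by
          funext h; simp
        rw [hfg]

theorem splitOn_singleton (c : Char) (s : List Char) :
    PySem.Chars.splitOn s [c] = List.splitOn c s := by
  have := splitOn_go_eq c s (s.length + 1) [] [] (by omega)
  have hid : List.modifyHead (fun (h : List Char) => h) (List.splitOn c s) = List.splitOn c s := by
    cases List.splitOn c s <;> simp
  rw [PySem.Chars.splitOn]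
  simp only [List.reverse_nil, List.nil_append] at this
  rw [this, hid]

-- insertBy walks past a block it is not inserted into
theorem insertBy_skip {α : Type} (before : α → α → Bool) (x : α) :
    ∀ (ys zs : List α), (∀ y ∈ ys, before x y = false) →
    PySem.List.insertBy before x (ys ++ zs) = ys ++ PySem.List.insertBy before x zs := by
  intro ys zs h
  induction ys with
  | nil => simp
  | cons y ys ih =>
    simp only [List.cons_append, PySem.List.insertBy, h y (by simp)]
    simp only [Bool.false_eq_true, if_false, List.cons.injEq, true_and]
    exact ih (fun y hy => h y (by simp [hy]))

theorem insertBy_front {α : Type} (before : α → α → Bool) (x : α) (zs : List α)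
    (h : ∀ z ∈ zs, before x z = true) :
    PySem.List.insertBy before x zs = x :: zs := by
  cases zs with
  | nil => rfl
  | cons z zs => simp [PySem.List.insertBy, h z (by simp)]

-- inserting x into a length-bucketed list appends it at the end of its bucket
theorem insert_buckets {α : Type} (key : α → Int) (x : α) (xs : List α) :
    ∀ (ks : List Int), ks.Pairwise (· < ·) → key x ∈ ks →
    PySem.List.insertBy (fun a b => decide (key a < key b)) x
        (ks.flatMap (fun k => xs.filter (fun z => key z == k)))
      = ks.flatMap (fun k => (xs ++ [x]).filter (fun z => key z == k)) := by
  intro ks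
  induction ks with
  | nil => intro _ hx; simp at hx
  | cons k ks ih =>
    intro hpw hx
    have hklt : ∀ k' ∈ ks, k < k' := fun k' hk' => (List.pairwise_cons.mp hpw).1 k' hk'
    have hpw' : ks.Pairwise (· < ·) := (List.pairwise_cons.mp hpw).2
    simp only [List.flatMap_cons]
    by_cases hxk : key x = k
    · -- x lands at the end of the k-bucket, in front of everything after it
      have h1 : ∀ y ∈ xs.filter (fun z => key z == k), (fun a b => decide (key a < key b)) x y = false := by
        intro y hy
        have := (List.mem_filter.mp hy).2
        simp_all
      rw [insertBy_skip _ _ _ _ h1]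
      have h2 : PySem.List.insertBy (fun a b => decide (key a < key b)) x
          (ks.flatMap (fun k => xs.filter (fun z => key z == k)))
          = x :: ks.flatMap (fun k => xs.filter (fun z => key z == k)) := by
        apply insertBy_front
        intro z hz
        rcases List.mem_flatMap.mp hz with ⟨k', hk', hzk'⟩
        have := (List.mem_filter.mp hzk').2
        have := hklt k' hk'
        simp_all
      rw [h2]
      have h3 : ks.flatMap (fun k' => (xs ++ [x]).filter (fun z => key z == k'))
          = ks.flatMap (fun k' => xs.filter (fun z => key z == k')) := by
        apply List.flatMap_congr
        intro k' hk'
        have hkk' : k < k' := hklt k' hk'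
        rw [List.filter_append]
        have : [x].filter (fun z => key z == k') = [] := by
          simp [hxk]; omega
        simp [this]
      rw [h3, List.filter_append]
      have : [x].filter (fun z => key z == k) = [x] := by simp [hxk]
      simp [this]
    · -- x's key is further right; skip the whole k-bucket
      have hxks : key x ∈ ks := by
        rcases List.mem_cons.mp hx with h | h
        · exact absurd h hxk
        · exact h
      have hkx : k < key x := hklt _ hxks
      have h1 : ∀ y ∈ xs.filter (fun z => key z == k), (fun a b => decide (key a < key b)) x y = false := by
        intro y hy
        have hky : key y = k := by simpa using (List.mem_filter.mp hy).2
        simp only [decide_eq_false_iff_not, not_lt]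
        omega
      rw [insertBy_skip _ _ _ _ h1, ih hpw' hxks]
      have : (xs ++ [x]).filter (fun z => key z == k) = xs.filter (fun z => key z == k) := by
        rw [List.filter_append]
        have : [x].filter (fun z => key z == k) = [] := by simp_all
        simp [this]
      rw [this]

-- the stable sort by key is the concatenation of the key-buckets in increasing key order
theorem sorted_eq_buckets {α : Type} (key : α → Int) :
    ∀ (xs : List α) (ks : List Int), ks.Pairwise (· < ·) → (∀ x ∈ xs, key x ∈ ks) →
    PySem.List.sorted xs key = ks.flatMap (fun k => xs.filter (fun z => key z == k)) := by
  intro xs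
  induction xs using List.reverseRecOn with
  | nil => intro ks _ _; simp [PySem.List.sorted]
  | append_singleton xs x ih =>
    intro ks hpw hcov
    have hstep : PySem.List.sorted (xs ++ [x]) key
        = PySem.List.insertBy (fun a b => decide (key a < key b)) x (PySem.List.sorted xs key) := by
      rw [PySem.List.sorted_eq_foldl_insertBy, PySem.List.sorted_eq_foldl_insertBy, List.foldl_append]
      rfl
    rw [hstep, ih ks hpw (fun z hz => hcov z (by simp [hz]))]
    exact insert_buckets key x xs ks hpw (hcov x (by simp))

theorem pyRange_pairwise_lt (a b : Int) : (PySem.List.pyRange a b).Pairwise (· < ·) := by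
  by_cases hab : a < b
  · have h : ∀ (n : Nat) (a : Int), (b - a).toNat = n → (PySem.List.pyRange a b).Pairwise (· < ·) := by
      intro n
      induction n with
      | zero =>
        intro a ha
        have : b ≤ a := by omega
        have : PySem.List.pyRange a b = [] := by
          rw [List.eq_nil_iff_forall_not_mem]
          intro x hx
          have := PySem.List.mem_pyRange_one.mp hx
          omega
        simp [this]
      | succ n ih =>
        intro a ha
        by_cases h2 : a < b
        · rw [PySem.List.pyRange_one_cons h2]
          refine List.Pairwise.cons ?_ (ih (a+1) (by omega))
          intro x hx
          have := PySem.List.mem_pyRange_one.mp hx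
          omega
        · have : PySem.List.pyRange a b = [] := by
            rw [List.eq_nil_iff_forall_not_mem]
            intro x hx
            have := PySem.List.mem_pyRange_one.mp hx
            omega
          simp [this]
    exact h (b - a).toNat a rfl
  · have : PySem.List.pyRange a b = [] := by
      rw [List.eq_nil_iff_forall_not_mem]
      intro x hx
      have := PySem.List.mem_pyRange_one.mp hx
      omega
    simp [this]

theorem pvStep_prop (n : Int) (p : Int × Int) :
    ((let p1 := if n < p.1 then (n, p.2) else p
      if n > p1.2 then (p1.1, n) else p1) : Int × Int).1 ≤ p.1 ∧
    p.2 ≤ ((let p1 := if n < p.1 then (n, p.2) else p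
      if n > p1.2 then (p1.1, n) else p1) : Int × Int).2 ∧
    ((let p1 := if n < p.1 then (n, p.2) else p
      if n > p1.2 then (p1.1, n) else p1) : Int × Int).1 ≤ n ∧
    n ≤ ((let p1 := if n < p.1 then (n, p.2) else p
      if n > p1.2 then (p1.1, n) else p1) : Int × Int).2 := by
  split_ifs <;> dsimp only <;> split_ifs <;> simp_all <;> omega

theorem pvLenScan_le : ∀ (xs : List (List Char)) (p : Int × Int),
    (pvLenScan xs p).1 ≤ p.1 ∧ p.2 ≤ (pvLenScan xs p).2 := by
  intro xs
  induction xs with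
  | nil => intro p; simp [pvLenScan]
  | cons x xs ih =>
    intro p
    have step : pvLenScan (x :: xs) p = pvLenScan xs
        (let p1 := if ((x.length : Int)) < p.1 then ((x.length : Int), p.2) else p
         if ((x.length : Int)) > p1.2 then (p1.1, (x.length : Int)) else p1) := rfl
    rw [step]
    have hs := pvStep_prop ((x.length : Int)) p
    have h := ih (let p1 := if ((x.length : Int)) < p.1 then ((x.length : Int), p.2) else p
         if ((x.length : Int)) > p1.2 then (p1.1, (x.length : Int)) else p1)
    exact ⟨le_trans h.1 hs.1, le_trans hs.2.1 h.2⟩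

theorem pvLenScan_bound : ∀ (xs : List (List Char)) (p : Int × Int), ∀ x ∈ xs,
    (pvLenScan xs p).1 ≤ (x.length : Int) ∧ (x.length : Int) ≤ (pvLenScan xs p).2 := by
  intro xs
  induction xs with
  | nil => intro p x hx; simp at hx
  | cons y xs ih =>
    intro p x hx
    have step : pvLenScan (y :: xs) p = pvLenScan xs
        (let p1 := if ((y.length : Int)) < p.1 then ((y.length : Int), p.2) else p
         if ((y.length : Int)) > p1.2 then (p1.1, (y.length : Int)) else p1) := rfl
    rw [step]
    set q : Int × Int := (let p1 := if ((y.length : Int)) < p.1 then ((y.length : Int), p.2) else p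
         if ((y.length : Int)) > p1.2 then (p1.1, (y.length : Int)) else p1) with hq
    rcases List.mem_cons.mp hx with h | h
    · subst h
      have hle := pvLenScan_le xs q
      have hs := pvStep_prop ((x.length : Int)) p
      rw [← hq] at hs
      exact ⟨le_trans hle.1 hs.2.2.1, le_trans hs.2.2.2 hle.2⟩
    · exact ih q x h

theorem build_comma (l : List (List Char)) (hne : l ≠ []) :
    List.foldl (fun acc item => acc ++ item ++ [',']) ([] : List Char) l
      = PySem.Chars.join [','] l ++ [','] := by
  have key : ∀ (l : List (List Char)) (acc : List Char),
      List.foldl (fun acc item => acc ++ item ++ [',']) acc l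
        = acc ++ l.flatMap (fun it => it ++ [',']) := by
    intro l acc
    simp only [List.append_assoc]
    exact PySem.List.foldl_append_eq_flatMap _ l acc
  rw [key, List.nil_append]
  induction l with
  | nil => exact absurd rfl hne
  | cons x l ih =>
    cases l with
    | nil => simp [PySem.Chars.join_singleton]
    | cons y t =>
      rw [PySem.Chars.join_cons_cons]
      simp only [List.flatMap_cons, List.append_assoc] at ih ⊢
      rw [ih (by simp)]

theorem slice_drop_last {α : Type} (t : List α) (c : α) :
    PySem.List.slice (t ++ [c]) none (some (-1)) = t := by
  simp [PySem.List.slice]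

theorem ports_agree (refString : String) : sortedRefDes refString = sortedRefDes_alt refString := by
  simp only [sortedRefDes, sortedRefDes_alt]
  set parts := PySem.Chars.splitOn refString.toList [','] with hparts
  have hsp : parts = List.splitOn ',' refString.toList := splitOn_singleton ',' _
  have hne : parts ≠ [] := by
    rw [hsp, List.splitOn]; exact List.splitOnP_ne_nil _ _
  set mm := pvLenScan parts (10, 0) with hmm
  by_cases heq : mm.1 = mm.2
  · rw [if_pos heq]
    have hall : ∀ x ∈ parts, (x.length : Int) = mm.1 := by
      intro x hx
      have hb := pvLenScan_bound parts (10, 0) x hx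
      rw [← hmm] at hb
      omega
    have hsorted : PySem.List.sorted parts (fun part => (part.length : Int)) = parts := by
      apply PySem.List.sorted_eq_self_of_pairwise
      apply List.pairwise_of_forall_mem_list
      intro a ha b hb
      rw [hall a ha, hall b hb]
    rw [hsorted, hsp]
    have hjoin : PySem.Chars.join [','] (List.splitOn ',' refString.toList) = refString.toList :=
      List.intercalate_splitOn refString.toList ','
    rw [hjoin, String.ofList_toList]
  · rw [if_neg heq]
    have hcov : ∀ x ∈ parts, (x.length : Int) ∈ PySem.List.pyRange mm.1 (mm.2 + 1) := by
      intro x hx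
      have hb := pvLenScan_bound parts (10, 0) x hx
      rw [← hmm] at hb
      exact PySem.List.mem_pyRange_one.mpr (by omega)
    have hbuckets : PySem.List.sorted parts (fun part => (part.length : Int))
        = (PySem.List.pyRange mm.1 (mm.2 + 1)).flatMap
            (fun k => parts.filter (fun z => (z.length : Int) == k)) :=
      sorted_eq_buckets (fun part => (part.length : Int)) parts _
        (pyRange_pairwise_lt _ _) hcov
    have hinner : ∀ (leng : Int) (acc : List (List Char)),
        List.foldl (fun acc refDes =>
          if ((refDes.length : Int) == leng) then acc ++ [refDes] else acc) acc parts
          = acc ++ parts.filter (fun z => (z.length : Int) == leng) := by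
      intro leng acc
      have := PySem.List.foldl_append_if (fun refDes : List Char => ((refDes.length : Int) == leng))
        id parts acc
      simpa using this
    simp only [hinner]
    rw [PySem.List.foldl_append_eq_flatMap
      (fun leng => parts.filter (fun z => (z.length : Int) == leng))
      (PySem.List.pyRange mm.1 (mm.2 + 1)) [], List.nil_append, ← hbuckets]
    have hsne : PySem.List.sorted parts (fun part => (part.length : Int)) ≠ [] := by
      intro h
      exact hne ((PySem.List.sorted_eq_nil_iff parts _ false).mp h)
    rw [build_comma _ hsne, slice_drop_last]

-- ===== VERDICT (by name: the statement is the Claim_ definition above) =====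
theorem sortedRefDes_spec : Claim_equal_sortedRefDes := by
  intro s _
  exact ports_agree s
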